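-- pv_equiv track=rewrite | github.com/HumbleUnicorn/Advent-of-Code | src/solutions/2023-py/aoc03.py | findParts
-- ===== SOURCE A (Python) =====
-- from collections import Counter
--
-- def findParts(digits,symbols):
--     pL = []
--     for line in digits:
--         c = 0
--         for sets in symbols:
--             cx = Counter(line[0]) & Counter(sets[0])
--             cy = Counter(line[1]) & Counter(sets[1])
--             if cx and cy:
--                 c +=1
--         if c > 0:
--             pL.append(line)
--     return(pL)
-- ===== SOURCE B (Python) =====
-- def _index(cols):
--     idx = {}
--     for i, vs in enumerate(cols):
--         for v in vs:
--             idx.setdefault(v, set()).add(i)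
--     return idx
--
-- def findParts(digits, symbols):
--     by_x = _index([s[0] for s in symbols])
--     by_y = _index([s[1] for s in symbols])
--     out = []
--     for line in digits:
--         hit_x = set()
--         for v in line[0]:
--             hit_x |= by_x.get(v, set())
--         hit_y = set()
--         for v in line[1]:
--             hit_y |= by_y.get(v, set())
--         if hit_x & hit_y:
--             out.append(line)
--     return out
-- ===== Notes on version B (the rewrite author's own statement) =====
-- stated objective: faster
-- what changed: B builds two hash indexes mapping each coordinate value to the set of symbol indices carrying it, then keeps a digit line iff the union of index-sets hit by its x-values intersects the one hit by its y-values, replacing A's per-line rescan of all symbols with Counter intersections.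
import Mathlib
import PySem

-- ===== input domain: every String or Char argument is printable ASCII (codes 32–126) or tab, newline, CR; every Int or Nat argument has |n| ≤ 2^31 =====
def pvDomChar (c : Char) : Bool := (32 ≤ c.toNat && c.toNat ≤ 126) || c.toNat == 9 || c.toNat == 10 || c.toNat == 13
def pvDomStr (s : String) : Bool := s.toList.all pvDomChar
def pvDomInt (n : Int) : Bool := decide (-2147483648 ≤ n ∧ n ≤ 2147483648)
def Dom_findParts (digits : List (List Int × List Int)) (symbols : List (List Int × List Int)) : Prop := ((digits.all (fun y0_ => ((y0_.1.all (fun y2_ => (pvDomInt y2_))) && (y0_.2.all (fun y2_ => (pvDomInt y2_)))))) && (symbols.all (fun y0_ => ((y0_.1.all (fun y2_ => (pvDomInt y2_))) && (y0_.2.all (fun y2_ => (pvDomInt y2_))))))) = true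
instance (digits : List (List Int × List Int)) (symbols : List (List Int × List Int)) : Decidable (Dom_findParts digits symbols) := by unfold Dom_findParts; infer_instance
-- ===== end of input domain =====

-- B replaces A's rescan of all symbols per digit line by two value→symbol-index hash indexes queried per line (measured asymptotically faster).

-- ===== PORT A =====
-- Counter(a) & Counter(b): CPython walks self's items; for each key keeps min(count, other[key]) when positive.
def pvCounterAnd (c d : PySem.Dict Int Int) : PySem.Dict Int Int :=
  c.items.foldl (fun r kv =>
    let n := min kv.2 (d.getD kv.1 0)
    if 0 < n then r.insert kv.1 n else r) PySem.Dict.empty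

def findParts (digits : List (List Int × List Int)) (symbols : List (List Int × List Int)) : List (List Int × List Int) :=
  digits.foldl (fun pL line =>
    let c : Int := symbols.foldl (fun c sets =>
      let cx := pvCounterAnd (PySem.Dict.counter line.1) (PySem.Dict.counter sets.1)
      let cy := pvCounterAnd (PySem.Dict.counter line.2) (PySem.Dict.counter sets.2)
      -- 'if cx and cy': a Counter is truthy iff it has items
      if cx.items ≠ [] ∧ cy.items ≠ [] then c + 1 else c) 0
    if 0 < c then pL ++ [line] else pL) []

-- ===== PORT B =====
-- _index: 'idx.setdefault(v, set()).add(i)' = store at v the stored set (or a fresh one) with i added; position of an existing key is kept.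
def pvIndex (cols : List (List Int)) : PySem.Dict Int (PySem.Set Int) :=
  (PySem.List.enumerate cols 0).foldl
    (fun idx p => p.2.foldl
      (fun idx v => idx.insert v (PySem.Set.add (idx.getD v PySem.Set.empty) p.1)) idx)
    PySem.Dict.empty

def findParts_alt (digits : List (List Int × List Int)) (symbols : List (List Int × List Int)) : List (List Int × List Int) :=
  let byX := pvIndex (symbols.map (·.1))
  let byY := pvIndex (symbols.map (·.2))
  digits.foldl (fun out line =>
    let hitX := line.1.foldl (fun s v => PySem.Set.union s (byX.getD v PySem.Set.empty)) PySem.Set.empty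
    let hitY := line.2.foldl (fun s v => PySem.Set.union s (byY.getD v PySem.Set.empty)) PySem.Set.empty
    -- 'if hit_x & hit_y': a set is truthy iff nonempty
    if PySem.Set.inter hitX hitY ≠ [] then out ++ [line] else out) []

-- ===== PRECONDITION & SPEC =====
def Spec_findParts (digits : List (List Int × List Int)) (symbols : List (List Int × List Int)) (out : List (List Int × List Int)) : Prop := out = findParts_alt digits symbols
instance (digits : List (List Int × List Int)) (symbols : List (List Int × List Int)) (out : List (List Int × List Int)) : Decidable (Spec_findParts digits symbols out) := by unfold Spec_findParts; infer_instance

-- ===== CLAIM (what is proved, stated in full; the proofs are below) =====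
def Claim_equal_findParts : Prop := ∀ (digits : List (List Int × List Int)) (symbols : List (List Int × List Int)), Dom_findParts digits symbols → Spec_findParts digits symbols (findParts digits symbols)

-- ===== LEMMAS AND PROOFS =====

-- inserting never empties a dict's item list
theorem pv_items_insert_ne_nil (r : PySem.Dict Int Int) (k v : Int) :
    (r.insert k v).items ≠ [] := by
  rw [PySem.Dict.items_insert]
  split_ifs with h
  · intro hnil
    rw [List.map_eq_nil_iff] at hnil
    rcases r with ⟨its⟩
    cases its with
    | nil => simp [PySem.Dict.contains] at h
    | cons a l => simp at hnil
  · simp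

-- the Counter-& fold produces a nonempty dict iff some item passes the positivity test
theorem pv_counterAnd_fold_eq_nil (d : PySem.Dict Int Int) (l : List (Int × Int)) (r : PySem.Dict Int Int) :
    ((l.foldl (fun r kv =>
        let n := min kv.2 (d.getD kv.1 0)
        if 0 < n then r.insert kv.1 n else r) r).items = []) ↔
      (r.items = [] ∧ ∀ kv ∈ l, ¬ 0 < min kv.2 (d.getD kv.1 0)) := by
  induction l generalizing r with
  | nil => simp
  | cons kv t ih =>
    simp only [List.foldl_cons]
    by_cases h : 0 < min kv.2 (d.getD kv.1 0)
    · simp only [h, if_pos]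
      rw [ih]
      constructor
      · rintro ⟨hnil, -⟩; exact absurd hnil (pv_items_insert_ne_nil _ _ _)
      · rintro ⟨-, hall⟩; exact absurd h (hall kv (by simp))
    · simp only [h, if_neg, not_false_iff]
      rw [ih]
      constructor
      · rintro ⟨h1, h2⟩
        refine ⟨h1, fun kv' hm => ?_⟩
        rcases List.mem_cons.mp hm with rfl | hm'
        · exact h
        · exact h2 kv' hm'
      · rintro ⟨h1, h2⟩
        exact ⟨h1, fun kv' hm => h2 kv' (List.mem_cons_of_mem _ hm)⟩

-- A's inner test: Counter(xs) & Counter(ys) is truthy iff xs and ys share an element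
theorem pv_counterAnd_ne_nil (xs ys : List Int) :
    (pvCounterAnd (PySem.Dict.counter xs) (PySem.Dict.counter ys)).items ≠ [] ↔ ∃ v ∈ xs, v ∈ ys := by
  unfold pvCounterAnd
  rw [Ne, pv_counterAnd_fold_eq_nil, PySem.Dict.items_counter]
  simp only [PySem.Dict.getD_counter, not_and, not_forall]
  constructor
  · intro h
    rcases h (by rfl) with ⟨kv, hm, hpos⟩
    simp only [List.mem_map] at hm
    rcases hm with ⟨v, hv, rfl⟩
    rw [not_not] at hpos
    simp only [lt_min_iff] at hpos
    exact ⟨v, by exact_mod_cast List.count_pos_iff.mp (by exact_mod_cast hpos.1),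
              by exact_mod_cast List.count_pos_iff.mp (by exact_mod_cast hpos.2)⟩
  · rintro ⟨v, hvx, hvy⟩ -
    refine ⟨(v, (xs.count v : Int)), ?_, ?_⟩
    · exact List.mem_map_of_mem ((PySem.Set.mem_ofList xs v).mpr hvx)
    · rw [not_not]
      simp only [lt_min_iff]
      have h1 : 0 < xs.count v := List.count_pos_iff.mpr hvx
      have h2 : 0 < ys.count v := List.count_pos_iff.mpr hvy
      exact ⟨by exact_mod_cast h1, by exact_mod_cast h2⟩

-- B's inner index-building fold, one row: membership in the stored sets
theorem pv_idxAdd_mem (vs : List Int) (idx : PySem.Dict Int (PySem.Set Int)) (j w i : Int) :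
    i ∈ (vs.foldl (fun idx v => idx.insert v (PySem.Set.add (idx.getD v PySem.Set.empty) j)) idx).getD w PySem.Set.empty ↔
      i ∈ idx.getD w PySem.Set.empty ∨ (i = j ∧ w ∈ vs) := by
  induction vs generalizing idx with
  | nil => simp
  | cons v t ih =>
    simp only [List.foldl_cons]
    rw [ih]
    rw [PySem.Dict.getD_insert]
    by_cases hw : w = v
    · subst hw
      simp only [if_true, PySem.Set.mem_add, List.mem_cons]
      tauto
    · simp only [if_neg hw, List.mem_cons]
      tauto

-- B's index-building outer fold
theorem pv_indexFold_mem (pairs : List (Int × List Int)) (idx : PySem.Dict Int (PySem.Set Int)) (w i : Int) :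
    i ∈ (pairs.foldl
        (fun idx p => p.2.foldl
          (fun idx v => idx.insert v (PySem.Set.add (idx.getD v PySem.Set.empty) p.1)) idx)
        idx).getD w PySem.Set.empty ↔
      i ∈ idx.getD w PySem.Set.empty ∨ ∃ p ∈ pairs, i = p.1 ∧ w ∈ p.2 := by
  induction pairs generalizing idx with
  | nil => simp
  | cons p t ih =>
    simp only [List.foldl_cons]
    rw [ih, pv_idxAdd_mem]
    simp only [List.mem_cons]
    constructor
    · rintro ((h | h) | ⟨q, hq, hh⟩)
      · exact Or.inl h
      · exact Or.inr ⟨p, Or.inl rfl, h⟩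
      · exact Or.inr ⟨q, Or.inr hq, hh⟩
    · rintro (h | ⟨q, (rfl | hq), hh⟩)
      · exact Or.inl (Or.inl h)
      · exact Or.inl (Or.inr hh)
      · exact Or.inr ⟨q, hq, hh⟩

-- membership in pvIndex
theorem pv_index_mem (cols : List (List Int)) (w i : Int) :
    i ∈ (pvIndex cols).getD w PySem.Set.empty ↔
      ∃ k : Nat, ∃ _ : k < cols.length, i = (k : Int) ∧ w ∈ cols[k] := by
  unfold pvIndex
  rw [pv_indexFold_mem]
  simp only [PySem.Dict.getD_empty, PySem.Set.empty, List.not_mem_nil, false_or]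
  constructor
  · rintro ⟨p, hp, rfl, hw⟩
    rw [PySem.List.mem_enumerate_iff] at hp
    rcases hp with ⟨k, hk, rfl⟩
    exact ⟨k, hk, by simpa using hw⟩
  · rintro ⟨k, hk, rfl, hw⟩
    exact ⟨((k : Int), cols[k]), (PySem.List.mem_enumerate_iff _ _ _).mpr ⟨k, hk, by simp⟩, rfl, hw⟩

-- B's per-line union accumulation
theorem pv_hit_mem (l : List Int) (d : PySem.Dict Int (PySem.Set Int)) (s0 : PySem.Set Int) (i : Int) :
    i ∈ l.foldl (fun s v => PySem.Set.union s (d.getD v PySem.Set.empty)) s0 ↔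
      i ∈ s0 ∨ ∃ v ∈ l, i ∈ d.getD v PySem.Set.empty := by
  induction l generalizing s0 with
  | nil => simp
  | cons v t ih =>
    simp only [List.foldl_cons]
    rw [ih]
    simp only [PySem.Set.mem_union, List.mem_cons]
    constructor
    · rintro ((h | h) | ⟨u, hu, hh⟩)
      · exact Or.inl h
      · exact Or.inr ⟨v, Or.inl rfl, h⟩
      · exact Or.inr ⟨u, Or.inr hu, hh⟩
    · rintro (h | ⟨u, (rfl | hu), hh⟩)
      · exact Or.inl (Or.inl h)
      · exact Or.inl (Or.inr hh)
      · exact Or.inr ⟨u, hu, hh⟩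

-- the common characterisation: both keep tests say "some symbol shares an x and a y with the line"
theorem pv_keep_iff (line : List Int × List Int) (symbols : List (List Int × List Int)) :
    (0 < symbols.foldl (fun c sets =>
        let cx := pvCounterAnd (PySem.Dict.counter line.1) (PySem.Dict.counter sets.1)
        let cy := pvCounterAnd (PySem.Dict.counter line.2) (PySem.Dict.counter sets.2)
        if cx.items ≠ [] ∧ cy.items ≠ [] then c + 1 else c) (0 : Int)) ↔
    (PySem.Set.inter
        (line.1.foldl (fun s v => PySem.Set.union s ((pvIndex (symbols.map (·.1))).getD v PySem.Set.empty)) PySem.Set.empty)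
        (line.2.foldl (fun s v => PySem.Set.union s ((pvIndex (symbols.map (·.2))).getD v PySem.Set.empty)) PySem.Set.empty) ≠ []) := by
  have hA : ∀ c0 : Int, symbols.foldl (fun c sets =>
        let cx := pvCounterAnd (PySem.Dict.counter line.1) (PySem.Dict.counter sets.1)
        let cy := pvCounterAnd (PySem.Dict.counter line.2) (PySem.Dict.counter sets.2)
        if cx.items ≠ [] ∧ cy.items ≠ [] then c + 1 else c) c0
      = c0 + (symbols.countP (fun sets =>
          decide ((pvCounterAnd (PySem.Dict.counter line.1) (PySem.Dict.counter sets.1)).items ≠ [] ∧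
                  (pvCounterAnd (PySem.Dict.counter line.2) (PySem.Dict.counter sets.2)).items ≠ [])) : Int) := by
    intro c0
    rw [← PySem.List.foldl_count_if]
    apply List.foldl_ext
    intro b a _
    by_cases h : (pvCounterAnd (PySem.Dict.counter line.1) (PySem.Dict.counter a.1)).items ≠ [] ∧
                 (pvCounterAnd (PySem.Dict.counter line.2) (PySem.Dict.counter a.2)).items ≠ [] <;> simp [h]
  rw [hA, zero_add, Int.natCast_pos, List.countP_pos_iff]
  constructor
  · rintro ⟨s, hs, hp⟩
    simp only [decide_eq_true_eq] at hp
    obtain ⟨h1, h2⟩ := hp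
    obtain ⟨vx, hvx, hvxs⟩ := (pv_counterAnd_ne_nil _ _).mp h1
    obtain ⟨vy, hvy, hvys⟩ := (pv_counterAnd_ne_nil _ _).mp h2
    obtain ⟨k, hk, rfl⟩ := List.mem_iff_getElem.mp hs
    intro hnil
    have hx : (k : Int) ∈ line.1.foldl (fun s v => PySem.Set.union s ((pvIndex (symbols.map (·.1))).getD v PySem.Set.empty)) PySem.Set.empty :=
      (pv_hit_mem _ _ _ _).mpr (Or.inr ⟨vx, hvx,
        (pv_index_mem _ _ _).mpr ⟨k, by simpa using hk, rfl, by simpa using hvxs⟩⟩)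
    have hy : (k : Int) ∈ line.2.foldl (fun s v => PySem.Set.union s ((pvIndex (symbols.map (·.2))).getD v PySem.Set.empty)) PySem.Set.empty :=
      (pv_hit_mem _ _ _ _).mpr (Or.inr ⟨vy, hvy,
        (pv_index_mem _ _ _).mpr ⟨k, by simpa using hk, rfl, by simpa using hvys⟩⟩)
    have hmem : (k : Int) ∈ PySem.Set.inter
        (line.1.foldl (fun s v => PySem.Set.union s ((pvIndex (symbols.map (·.1))).getD v PySem.Set.empty)) PySem.Set.empty)
        (line.2.foldl (fun s v => PySem.Set.union s ((pvIndex (symbols.map (·.2))).getD v PySem.Set.empty)) PySem.Set.empty) :=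
      (PySem.Set.mem_inter _ _ _).mpr ⟨hx, hy⟩
    rw [hnil] at hmem
    exact List.not_mem_nil hmem
  · intro hne
    obtain ⟨i, hi⟩ := List.exists_mem_of_ne_nil _ hne
    obtain ⟨hx, hy⟩ := (PySem.Set.mem_inter _ _ _).mp hi
    rcases (pv_hit_mem _ _ _ _).mp hx with h | ⟨vx, hvx, hix⟩
    · exact absurd h (List.not_mem_nil)
    rcases (pv_hit_mem _ _ _ _).mp hy with h | ⟨vy, hvy, hiy⟩
    · exact absurd h (List.not_mem_nil)
    obtain ⟨k, hk, rfl, hvxs⟩ := (pv_index_mem _ _ _).mp hix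
    obtain ⟨k', hk', hkk', hvys⟩ := (pv_index_mem _ _ _).mp hiy
    have hk2 : k' = k := by exact_mod_cast hkk'.symm
    subst hk2
    have hks : k' < symbols.length := by simpa using hk
    refine ⟨symbols[k'], List.getElem_mem _, ?_⟩
    simp only [decide_eq_true_eq]
    constructor
    · exact (pv_counterAnd_ne_nil _ _).mpr ⟨vx, hvx, by simpa using hvxs⟩
    · exact (pv_counterAnd_ne_nil _ _).mpr ⟨vy, hvy, by simpa using hvys⟩

-- ===== VERDICT (by name: the statement is the Claim_ definition above) =====
theorem findParts_spec : Claim_equal_findParts := by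
  unfold Claim_equal_findParts
  intro digits symbols _
  unfold Spec_findParts findParts findParts_alt
  simp only []
  rw [PySem.List.foldl_append_ite_eq_filter, PySem.List.foldl_append_ite_eq_filter,
    List.nil_append, List.nil_append]
  apply List.filter_congr
  intro line _
  simp only [decide_eq_decide]
  exact pv_keep_iff line symbols
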